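-- pv_equiv track=rewrite | github.com/divyavis/notes2notes | Term Project/journalReading.py | eliminateNonMatches
-- ===== SOURCE A (Python) =====
-- def eliminateNonMatches(rankedSongs, maxSongs=None):
--     updatedSongs = []
--     for song in rankedSongs:
--         if maxSongs == None:
--             #song[2] is song score
--             if song[2] > 0:
--                 updatedSongs.append(song)
--         else:
--             if song[2] > 0 and len(updatedSongs) < maxSongs:
--                 updatedSongs.append(song)
--     return updatedSongs
-- ===== SOURCE B (Python) =====
-- def eliminateNonMatches(rankedSongs, maxSongs=None):
--     return _pick(rankedSongs, maxSongs)
--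
-- def _pick(songs, quota):
--     # Divide and conquer: solve each half recursively; the right half's quota
--     # is reduced by however many songs the left half yielded (None = unlimited).
--     if quota is not None and quota <= 0:
--         return []
--     if len(songs) <= 1:
--         return [s for s in songs if s[2] > 0]
--     mid = len(songs) // 2
--     left = _pick(songs[:mid], quota)
--     right = _pick(songs[mid:], None if quota is None else quota - len(left))
--     return left + right
-- ===== Notes on version B (the rewrite author's own statement) =====
-- stated objective: alternative
-- what changed: B replaces A's single left-to-right loop that threads the accumulator length through the append test with a divide-and-conquer recursion: split the list in half, solve the left half with the full quota, solve the right half with the quota reduced by the left yield, and concatenate.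
import Mathlib
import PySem

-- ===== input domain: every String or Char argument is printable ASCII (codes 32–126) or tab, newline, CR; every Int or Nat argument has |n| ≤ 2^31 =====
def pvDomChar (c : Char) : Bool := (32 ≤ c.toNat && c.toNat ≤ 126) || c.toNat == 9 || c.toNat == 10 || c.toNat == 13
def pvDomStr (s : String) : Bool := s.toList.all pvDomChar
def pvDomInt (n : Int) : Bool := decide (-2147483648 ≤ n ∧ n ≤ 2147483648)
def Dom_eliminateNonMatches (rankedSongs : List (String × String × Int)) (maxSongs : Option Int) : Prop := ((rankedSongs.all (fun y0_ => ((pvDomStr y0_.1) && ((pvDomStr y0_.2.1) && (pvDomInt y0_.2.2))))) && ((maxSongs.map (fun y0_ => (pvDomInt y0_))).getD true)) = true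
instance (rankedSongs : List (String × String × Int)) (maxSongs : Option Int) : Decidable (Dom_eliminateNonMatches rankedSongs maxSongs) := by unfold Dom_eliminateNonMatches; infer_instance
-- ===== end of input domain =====

-- ===== PORT A =====
-- B replaces A's single counting loop by a divide-and-conquer recursion on list halves
-- (objective: alternative; same result, different shape of traversal).
def eliminateNonMatches (rankedSongs : List (String × String × Int)) (maxSongs : Option Int) : List (String × String × Int) :=
  rankedSongs.foldl (fun updatedSongs song =>
    match maxSongs with
    | none =>
        if song.2.2 > 0 then updatedSongs ++ [song] else updatedSongs
    | some m =>
        if song.2.2 > 0 ∧ (updatedSongs.length : Int) < m then updatedSongs ++ [song] else updatedSongs) []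

-- ===== PORT B =====
-- quota is not None and quota <= 0
def pvQuotaDone (quota : Option Int) : Bool :=
  match quota with
  | none => false
  | some q => q ≤ 0

-- _pick from Source B: divide and conquer over halves of the list
def pvPick (songs : List (String × String × Int)) (quota : Option Int) : List (String × String × Int) :=
  if pvQuotaDone quota then []
  else if _h : songs.length ≤ 1 then songs.filter (fun s => s.2.2 > 0)
  else
    let mid := songs.length / 2
    let left := pvPick (songs.take mid) quota
    let right := pvPick (songs.drop mid)
      (match quota with | none => none | some q => some (q - left.length))
    left ++ right
termination_by songs.length
decreasing_by
  · simp only [List.length_take]; omega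
  · simp only [List.length_drop]; omega

def eliminateNonMatches_alt (rankedSongs : List (String × String × Int)) (maxSongs : Option Int) : List (String × String × Int) :=
  pvPick rankedSongs maxSongs

-- ===== PRECONDITION & SPEC =====
def Spec_eliminateNonMatches (rankedSongs : List (String × String × Int)) (maxSongs : Option Int) (out : List (String × String × Int)) : Prop := out = eliminateNonMatches_alt rankedSongs maxSongs
instance (rankedSongs : List (String × String × Int)) (maxSongs : Option Int) (out : List (String × String × Int)) : Decidable (Spec_eliminateNonMatches rankedSongs maxSongs out) := by unfold Spec_eliminateNonMatches; infer_instance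

-- ===== CLAIM =====
def Claim_equal_eliminateNonMatches : Prop := ∀ (rankedSongs : List (String × String × Int)) (maxSongs : Option Int), Dom_eliminateNonMatches rankedSongs maxSongs → Spec_eliminateNonMatches rankedSongs maxSongs (eliminateNonMatches rankedSongs maxSongs)

-- ===== LEMMAS AND PROOFS =====

-- A's loop with no limit appends exactly the positive songs.
theorem foldl_none (rs : List (String × String × Int)) (acc : List (String × String × Int)) :
    rs.foldl (fun u s => if s.2.2 > 0 then u ++ [s] else u) acc
      = acc ++ rs.filter (fun s => s.2.2 > 0) := by
  induction rs generalizing acc with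
  | nil => simp
  | cons h t ih =>
      by_cases hp : h.2.2 > 0 <;> simp [List.foldl, hp, ih]

-- Invariant of A's limited loop: it appends the first (m - |acc|)⁺ positive songs.
theorem foldl_some (m : Int) (rs : List (String × String × Int)) (acc : List (String × String × Int)) :
    rs.foldl (fun u s => if s.2.2 > 0 ∧ (u.length : Int) < m then u ++ [s] else u) acc
      = acc ++ (rs.filter (fun s => s.2.2 > 0)).take (m - acc.length).toNat := by
  induction rs generalizing acc with
  | nil => simp
  | cons h t ih =>
      by_cases hp : h.2.2 > 0
      · by_cases hl : (acc.length : Int) < m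
        · have e : (m - acc.length).toNat = (m - (acc.length + 1)).toNat + 1 := by omega
          simp [List.foldl, hp, hl, ih, e, List.take_succ_cons]
        · have e : (m - acc.length).toNat = 0 := by omega
          simp [List.foldl, hp, hl, ih, e]
      · simp [List.foldl, hp, ih]

-- B's divide-and-conquer computes filter (no quota) resp. take of filter (quota q).
theorem pick_eq (songs : List (String × String × Int)) (quota : Option Int) :
    pvPick songs quota
      = match quota with
        | none => songs.filter (fun s => s.2.2 > 0)
        | some q => (songs.filter (fun s => s.2.2 > 0)).take q.toNat := by
  fun_induction pvPick songs quota with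
  | case1 songs quota hdone =>
      cases quota with
      | none => simp [pvQuotaDone] at hdone
      | some q =>
          simp only [pvQuotaDone, decide_eq_true_eq] at hdone
          have h0 : q.toNat = 0 := by omega
          simp [h0]
  | case2 songs quota hdone hlen =>
      cases quota with
      | none => rfl
      | some q =>
          simp only [pvQuotaDone, decide_eq_true_eq] at hdone
          have h1 : (songs.filter (fun s => decide (s.2.2 > 0))).length ≤ 1 :=
            le_trans (List.length_filter_le _ _) hlen
          exact (List.take_of_length_le (by omega)).symm
  | case3 songs quota hdone hlen mid left right ihA ihB ihC =>
      simp only [mid, left, right] at ihA ihC ⊢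
      rw [ihC, ihA]
      clear ihB ihA ihC right left
      cases quota with
      | none =>
          simp only []
          rw [← List.filter_append, List.take_append_drop]
      | some q =>
          have hq : 0 < q := by
            simp only [pvQuotaDone, decide_eq_true_eq] at hdone; omega
          simp only []
          conv_rhs => rw [← List.take_append_drop (songs.length / 2) songs]
          rw [List.filter_append, List.take_append]
          congr 1
          congr 1
          simp only [List.length_take]
          omega

-- ===== VERDICT =====
theorem eliminateNonMatches_spec : Claim_equal_eliminateNonMatches := by
  intro rs ms _
  unfold Spec_eliminateNonMatches eliminateNonMatches eliminateNonMatches_alt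
  rw [pick_eq]
  cases ms with
  | none => simpa using foldl_none rs []
  | some m =>
      have := foldl_some m rs []
      simp only [List.length_nil, Int.natCast_zero, Int.sub_zero, List.nil_append] at this
      simp only [this]
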